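-- pv_equiv track=rewrite | github.com/Secretive-Coder/PyDataSciHub | String_Program.py | replace_duplicate_occurrence
-- ===== SOURCE A (Python) =====
-- def replace_duplicate_occurrence(s):
--     seen = set()
--     result = []
--     for char in s:
--         if char in seen:
--             result.append('$')
--         else:
--             result.append(char)
--             seen.add(char)
--     return ''.join(result)
-- ===== SOURCE B (Python) =====
-- def replace_duplicate_occurrence(s):
--     # Head-and-erase: repeatedly keep the first remaining character and blank out
--     # all its later occurrences at once with str.replace; no seen-set is maintained.
--     out = []
--     rest = s
--     while rest:
--         head = rest[0]
--         out.append(head)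
--         rest = rest[1:].replace(head, '$')
--     return ''.join(out)
-- ===== Notes on version B (the rewrite author's own statement) =====
-- stated objective: alternative
-- what changed: Replaces the single-pass seen-set/result-list loop with an iterative head-and-erase scheme: repeatedly keep the first remaining character and blank out all its later occurrences at once with str.replace, continuing on the rest.
import Mathlib
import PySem

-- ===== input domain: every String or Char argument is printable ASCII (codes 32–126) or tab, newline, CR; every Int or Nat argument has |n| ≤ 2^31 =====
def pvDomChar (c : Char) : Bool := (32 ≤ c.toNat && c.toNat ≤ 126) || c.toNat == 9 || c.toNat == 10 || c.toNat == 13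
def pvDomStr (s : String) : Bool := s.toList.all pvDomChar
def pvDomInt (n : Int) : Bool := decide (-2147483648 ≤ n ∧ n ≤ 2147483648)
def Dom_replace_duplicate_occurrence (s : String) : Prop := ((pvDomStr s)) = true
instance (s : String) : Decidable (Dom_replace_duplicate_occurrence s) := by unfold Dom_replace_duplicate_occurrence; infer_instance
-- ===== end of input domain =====

-- B replaces A's single-pass seen-set/result-list loop with an iterative head-and-erase
-- scheme (keep the first remaining character, blank its later occurrences with str.replace,
-- continue on the rest); an alternative algorithm of the same behaviour, not claimed faster.

-- ===== PORT A =====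
-- the for-loop of A over (seen, result)
def pvALoop : List Char → PySem.Set Char → List Char → List Char
  | [], _, result => result
  | c :: rest, seen, result =>
    if PySem.Set.contains seen c then
      pvALoop rest seen (result ++ ['$'])
    else
      pvALoop rest (PySem.Set.add seen c) (result ++ [c])

def replace_duplicate_occurrence (s : String) : String :=
  String.mk (pvALoop s.toList PySem.Set.empty [])

-- ===== PORT B =====
-- Source B's while-loop over (out, rest); rest[1:].replace(head, '$') with single-character
-- arguments is exactly the character-wise map below (exact on all strings).
def pvBLoop : List Char → List Char → List Char
  | out, [] => out
  | out, c :: rest => pvBLoop (out ++ [c]) (rest.map (fun x => if x = c then '$' else x))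
termination_by _ rest => rest.length
decreasing_by simp

def replace_duplicate_occurrence_alt (s : String) : String :=
  String.mk (pvBLoop [] s.toList)

-- ===== PRECONDITION & SPEC =====
def Spec_replace_duplicate_occurrence (s : String) (out : String) : Prop := out = replace_duplicate_occurrence_alt s
instance (s : String) (out : String) : Decidable (Spec_replace_duplicate_occurrence s out) := by unfold Spec_replace_duplicate_occurrence; infer_instance

-- ===== CLAIM (what is proved, stated in full; the proofs are below) =====
def Claim_equal_replace_duplicate_occurrence : Prop := ∀ (s : String), Dom_replace_duplicate_occurrence s → Spec_replace_duplicate_occurrence s (replace_duplicate_occurrence s)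

-- ===== LEMMAS AND PROOFS =====

-- bridge invariant: A's loop, started with `seen`, equals B's recursion applied to the
-- list with every already-seen character blanked to '$'
theorem pv_bridge (l : List Char) : ∀ (seen : PySem.Set Char) (acc : List Char),
    pvALoop l seen acc =
      pvBLoop acc (l.map (fun x => if x ∈ seen then '$' else x)) := by
  induction l with
  | nil => intro seen acc; simp [pvALoop, pvBLoop]
  | cons c rest ih =>
    intro seen acc
    by_cases hc : c ∈ seen
    · have hcb : PySem.Set.contains seen c = true := (PySem.Set.contains_iff seen c).2 hc
      rw [pvALoop, if_pos hcb, ih seen (acc ++ ['$'])]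
      simp only [List.map_cons]
      rw [if_pos hc]
      simp only [pvBLoop, List.map_map]
      have hpt : rest.map ((fun x => if x = '$' then '$' else x) ∘
          (fun x => if x ∈ seen then '$' else x)) =
          rest.map (fun x => if x ∈ seen then '$' else x) := by
        apply List.map_congr_left; intro x _
        by_cases h : x ∈ seen
        · simp only [Function.comp_apply, if_pos h]
          split <;> rfl
        · simp only [Function.comp_apply, if_neg h]
          by_cases h2 : x = '$'
          · rw [if_pos h2, h2]
          · rw [if_neg h2]
      rw [hpt]
    · have hcb : ¬ PySem.Set.contains seen c = true := fun h =>
        hc ((PySem.Set.contains_iff seen c).1 h)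
      rw [pvALoop, if_neg hcb, ih (PySem.Set.add seen c) (acc ++ [c])]
      simp only [List.map_cons]
      rw [if_neg hc]
      simp only [pvBLoop, List.map_map]
      have hpt : rest.map ((fun x => if x = c then '$' else x) ∘
          (fun x => if x ∈ seen then '$' else x)) =
          rest.map (fun x => if x ∈ PySem.Set.add seen c then '$' else x) := by
        apply List.map_congr_left; intro x _
        by_cases h : x ∈ seen
        · simp only [Function.comp_apply, if_pos h,
            if_pos ((PySem.Set.mem_add seen c x).2 (Or.inl h))]
          split <;> rfl
        · simp only [Function.comp_apply, if_neg h]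
          by_cases h2 : x = c
          · rw [if_pos h2, if_pos ((PySem.Set.mem_add seen c x).2 (Or.inr h2))]
          · rw [if_neg h2, if_neg (fun hx => ((PySem.Set.mem_add seen c x).1 hx).elim h h2)]
      rw [hpt]

-- ===== VERDICT (by name: the statement is the Claim_ definition above) =====
theorem replace_duplicate_occurrence_spec : Claim_equal_replace_duplicate_occurrence := by
  intro s _
  unfold Spec_replace_duplicate_occurrence replace_duplicate_occurrence replace_duplicate_occurrence_alt
  rw [pv_bridge s.toList PySem.Set.empty []]
  have hmap : s.toList.map (fun x => if x ∈ (PySem.Set.empty : PySem.Set Char) then '$' else x)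
      = s.toList := by
    have h : ∀ x ∈ s.toList,
        (fun x => if x ∈ (PySem.Set.empty : PySem.Set Char) then '$' else x) x = id x := by
      intro x _
      show (if x ∈ (PySem.Set.empty : PySem.Set Char) then '$' else x) = x
      rw [if_neg (by simp [PySem.Set.empty])]
    rw [List.map_congr_left h, List.map_id]
  rw [hmap]
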